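-- pv_equiv track=rewrite | github.com/aromito7/Leetcode | 2701-2800/2732.FindaGoodSubsetoftheMatrix.py | goodSubsetofBinaryMatrix
-- ===== SOURCE A (Python) =====
-- from typing import List
--
-- def valid_rows(row_1, row_2):
--     for n in range(len(row_1) - 1):
--         if row_1[n] + row_2[n] > 1:
--             return False
--
--     return True
--
-- def goodSubsetofBinaryMatrix(grid: List[List[int]]) -> List[int]:
--     unique_vals = set()
--     unique_rows = []
--
--     for i, row in enumerate(grid):
--         val = 0
--         for num in row:
--             val *= 2
--             val += num
--
--
--         if val not in unique_vals:
--             unique_vals.add(val)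
--             unique_rows.append(row + [i])
--
--     for row in unique_rows:
--         if sum(row[:-1]) == 0:
--             return [row[-1]]
--
--     for i, row_1 in enumerate(unique_rows):
--         for row_2 in unique_rows[i + 1:]:
--             if valid_rows(row_1, row_2):
--                 return [row_1[-1], row_2[-1]]
--
--     return []
-- ===== SOURCE B (Python) =====
-- from typing import List
--
-- def goodSubsetofBinaryMatrix(grid: List[List[int]]) -> List[int]:
--     # One streaming pass with a pruned best-so-far search: each new unique row is
--     # compared only against earlier unique rows at positions below the current best
--     # pair's first position (branch-and-bound); a lexicographically smaller pair can
--     # only arise there, so the final best equals the first pair A's nested scan finds.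
--     seen = set()
--     prev = []            # unique rows with their original indices, first-occurrence order
--     zero = None          # original index of the first unique row summing to 0
--     best = None          # (position in prev, orig index i, orig index j), lexicographic minimum so far
--     for j, row in enumerate(grid):
--         enc = 0
--         for num in row:
--             enc = enc * 2 + num
--         if enc in seen:
--             continue
--         seen.add(enc)
--         if zero is None and sum(row) == 0:
--             zero = j
--         limit = best[0] if best is not None else len(prev)
--         for pos in range(limit):
--             r, i = prev[pos]
--             if all(x + y <= 1 for x, y in zip(r, row)):
--                 best = (pos, i, j)
--                 break
--         prev.append((row, j))
--     if zero is not None: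
--         return [zero]
--     return [best[1], best[2]] if best is not None else []
-- ===== Notes on version B (the rewrite author's own statement) =====
-- stated objective: alternative
-- what changed: B replaces A's three staged passes (dedup into an index-augmented row list, a rescan for a zero-sum row, then a nested scan of every unique row against all later ones) by ONE streaming pass that keeps the lexicographically best pair found so far and compares each new unique row only against earlier rows at positions below the current best pair's first position (a pruned best-so-far search); correctness rests on the fact that a lexicographically smaller pair can only use a strictly smaller first position.
-- outside the precondition, e.g. on goodSubsetofBinaryMatrix([[-1, 5], [2]]): A returns [], B returns [0, 1]; on goodSubsetofBinaryMatrix([[0, 1, 0, 0], [1, 0]]): A raises IndexError, B returns [0, 1]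
import Mathlib
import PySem

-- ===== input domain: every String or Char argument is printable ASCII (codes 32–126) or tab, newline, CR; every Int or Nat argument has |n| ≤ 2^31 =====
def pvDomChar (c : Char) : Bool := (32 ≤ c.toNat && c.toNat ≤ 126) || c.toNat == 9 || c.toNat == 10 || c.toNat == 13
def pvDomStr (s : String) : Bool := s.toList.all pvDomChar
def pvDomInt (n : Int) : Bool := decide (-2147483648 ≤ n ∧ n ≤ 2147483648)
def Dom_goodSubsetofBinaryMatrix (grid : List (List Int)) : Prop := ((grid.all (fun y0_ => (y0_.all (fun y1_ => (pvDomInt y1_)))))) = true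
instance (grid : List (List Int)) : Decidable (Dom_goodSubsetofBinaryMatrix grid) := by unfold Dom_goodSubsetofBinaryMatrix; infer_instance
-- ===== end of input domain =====

-- B replaces A's three staged passes (dedup, zero-row rescan, nested scan over all
-- later unique rows) by ONE streaming pass that keeps a lexicographically best pair
-- so far and compares each new unique row only against earlier rows at positions
-- BELOW the current best pair's first position (a pruned best-so-far search).

-- ===== PORT A =====
def valid_rows (row_1 row_2 : List Int) : Bool :=
  (PySem.List.pyRange 0 ((row_1.length : Int) - 1) 1).all
    (fun n => !(decide (PySem.List.pyGetD row_1 n 0 + PySem.List.pyGetD row_2 n 0 > 1)))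

def pvPairLoopA : List (List Int) → List Int
  | [] => []
  | row_1 :: rest =>
    match rest.find? (fun row_2 => valid_rows row_1 row_2) with
    | some row_2 => [PySem.List.pyGetD row_1 (-1) 0, PySem.List.pyGetD row_2 (-1) 0]
    | none => pvPairLoopA rest

def goodSubsetofBinaryMatrix (grid : List (List Int)) : List Int :=
  let st := (PySem.List.enumerate grid 0).foldl
    (fun (st : PySem.Set Int × List (List Int)) p =>
      let val := p.2.foldl (fun v num => v * 2 + num) 0
      if PySem.Set.contains st.1 val then st
      else (PySem.Set.add st.1 val, st.2 ++ [p.2 ++ [p.1]]))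
    ((PySem.Set.empty : PySem.Set Int), ([] : List (List Int)))
  match st.2.find? (fun row => decide ((PySem.List.slice row none (some (-1))).sum = 0)) with
  | some row => [PySem.List.pyGetD row (-1) 0]
  | none => pvPairLoopA st.2

-- ===== PORT B =====
-- Source B's 'all(x + y <= 1 for x, y in zip(r, row))'
def pvCompat (r q : List Int) : Bool := (r.zip q).all (fun xy => decide (xy.1 + xy.2 ≤ 1))

-- Source B's inner loop 'for pos in range(limit): r, i = prev[pos]; if compat: best=(pos,i,j); break'
def pvScanB (q : List Int) : List (List Int × Int) → Nat → Option (Nat × Int)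
  | _, 0 => none
  | [], _ + 1 => none
  | p :: rest, l + 1 =>
    if pvCompat p.1 q then some (0, p.2)
    else (pvScanB q rest l).map (fun x => (x.1 + 1, x.2))

def goodSubsetofBinaryMatrix_alt (grid : List (List Int)) : List Int :=
  let st := (PySem.List.enumerate grid 0).foldl
    (fun (st : PySem.Set Int × List (List Int × Int) × Option Int × Option (Nat × Int × Int)) p =>
      if PySem.Set.contains st.1 (p.2.foldl (fun v num => v * 2 + num) 0) then st
      else
        (PySem.Set.add st.1 (p.2.foldl (fun v num => v * 2 + num) 0),
         st.2.1 ++ [(p.2, p.1)],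
         (if st.2.2.1 = none ∧ p.2.sum = (0 : Int) then some p.1 else st.2.2.1),
         (match pvScanB p.2 st.2.1 (match st.2.2.2 with | some b => b.1 | none => st.2.1.length) with
          | some x => some (x.1, x.2, p.1)
          | none => st.2.2.2)))
    ((PySem.Set.empty : PySem.Set Int), ([] : List (List Int × Int)),
     (none : Option Int), (none : Option (Nat × Int × Int)))
  match st.2.2.1 with
  | some z => [z]
  | none =>
    match st.2.2.2 with
    | some b => [b.2.1, b.2.2]
    | none => []

-- ===== PRECONDITION & SPEC =====
-- Pre_ excludes grids containing a row shorter than an earlier row with no conflicting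
-- shared column (both > 0 in some common position): on such pairs A can raise IndexError,
-- and where it returns, its column loop reads the row index it appended to each unique
-- row as if it were a matrix entry — an artefact of A's encoding.
def Pre_goodSubsetofBinaryMatrix (grid : List (List Int)) : Prop :=
  List.Pairwise
    (fun r s => s.length < r.length → ∃ n < s.length, 1 < r.getD n 0 + s.getD n 0) grid
instance (grid : List (List Int)) : Decidable (Pre_goodSubsetofBinaryMatrix grid) := by
  unfold Pre_goodSubsetofBinaryMatrix; infer_instance

def pvWitness_goodSubsetofBinaryMatrix : List (List Int) := [[0, 1], [1, 0], [1, 1]]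

def Spec_goodSubsetofBinaryMatrix (grid : List (List Int)) (out : List Int) : Prop := out = goodSubsetofBinaryMatrix_alt grid
instance (grid : List (List Int)) (out : List Int) : Decidable (Spec_goodSubsetofBinaryMatrix grid out) := by unfold Spec_goodSubsetofBinaryMatrix; infer_instance

-- ===== CLAIM (what is proved, stated in full; the proofs are below) =====
def Claim_equal_goodSubsetofBinaryMatrix : Prop := ∀ (grid : List (List Int)), Dom_goodSubsetofBinaryMatrix grid → Pre_goodSubsetofBinaryMatrix grid → Spec_goodSubsetofBinaryMatrix grid (goodSubsetofBinaryMatrix grid)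

-- ===== LEMMAS AND PROOFS =====

/-- Both ports' row key: the fold `val = val*2 + num`. -/
def pvKey (row : List Int) : Int := row.foldl (fun v num => v * 2 + num) 0

/-- The common dedup skeleton: first occurrences by key, with their indices. -/
def pvUniq : List (Int × List Int) → PySem.Set Int → List (List Int × Int)
  | [], _ => []
  | p :: rest, S =>
    if PySem.Set.contains S (pvKey p.2) then pvUniq rest S
    else (p.2, p.1) :: pvUniq rest (PySem.Set.add S (pvKey p.2))

/-- A's pairwise scan on (row, index) pairs with the zip predicate. -/
def pvPairLoopB : List (List Int × Int) → List Int
  | [] => []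
  | (r1, i1) :: rest =>
    match rest.find? (fun q => pvCompat r1 q.1) with
    | some q => [i1, q.2]
    | none => pvPairLoopB rest

/-- Spec of B's best-so-far component: first position owning a later compatible
    partner, with both original indices. -/
def pvBest : List (List Int × Int) → Option (Nat × Int × Int)
  | [] => none
  | p :: rest =>
    match rest.find? (fun q => pvCompat p.1 q.1) with
    | some q => some (0, p.2, q.2)
    | none => (pvBest rest).map (fun b => (b.1 + 1, b.2.1, b.2.2))

/-- Spec of B's zero component. -/
def pvZero (L : List (List Int × Int)) : Option Int :=
  (L.find? (fun p => decide (p.1.sum = 0))).map (·.2)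

lemma pvUniq_sublist : ∀ (l : List (Int × List Int)) (S : PySem.Set Int),
    ((pvUniq l S).map (fun p => (p.2, p.1))).Sublist l
  | [], _ => by simp [pvUniq]
  | q :: rest, S => by
    simp only [pvUniq]
    split
    · exact (pvUniq_sublist rest S).cons q
    · simpa using (pvUniq_sublist rest (PySem.Set.add S (pvKey q.2))).cons₂ q

lemma pvFind?_congr {α : Type} (p q : α → Bool) (l : List α)
    (h : ∀ a ∈ l, p a = q a) : l.find? p = l.find? q := by
  induction l with
  | nil => rfl
  | cons x xs ih =>
    simp only [List.find?_cons]
    rw [h x (by simp)]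
    cases hq : q x
    · exact ih (fun a ha => h a (by simp [ha]))
    · rfl

lemma pvRangeAll : ∀ (r1 r2 : List Int) (a b : Int), r1.length ≤ r2.length →
    (List.range r1.length).all
        (fun k => !decide ((r1 ++ [a]).getD k 0 + (r2 ++ [b]).getD k 0 > 1))
      = pvCompat r1 r2
  | [], r2, a, b, _ => by simp [pvCompat]
  | x :: xs, r2, a, b, hl => by
    rcases r2 with _ | ⟨y, ys⟩
    · simp at hl
    · have hlen : xs.length ≤ ys.length := by simpa using hl
      rw [List.length_cons, List.range_succ_eq_map]
      simp only [pvCompat, List.all_cons, List.all_map, List.zip_cons_cons]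
      have hhead : (!decide (((x :: xs) ++ [a]).getD 0 0 + ((y :: ys) ++ [b]).getD 0 0 > 1))
          = decide (x + y ≤ 1) := by
        simp only [List.cons_append, List.getD_cons_zero]
        by_cases h : x + y ≤ 1
        · simp [h]
        · simp [h]; omega
      rw [hhead]
      congr 1
      simpa [pvCompat] using pvRangeAll xs ys a b hlen

lemma pvValidRows_range (r1 r2 : List Int) (a b : Int) :
    valid_rows (r1 ++ [a]) (r2 ++ [b])
      = (List.range r1.length).all
          (fun k => !decide ((r1 ++ [a]).getD k 0 + (r2 ++ [b]).getD k 0 > 1)) := by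
  simp only [valid_rows, List.length_append, List.length_cons, List.length_nil]
  have hcast : ((r1.length + (0 + 1) : Nat) : Int) - 1 = ((r1.length : Nat) : Int) := by
    push_cast; ring
  rw [hcast, PySem.List.pyRange_one]
  simp [List.all_map, Function.comp_def, PySem.List.pyGetD_natCast, List.getD]

lemma pvValidRows_eq (r1 r2 : List Int) (a b : Int) (hl : r1.length ≤ r2.length) :
    valid_rows (r1 ++ [a]) (r2 ++ [b]) = pvCompat r1 r2 := by
  rw [pvValidRows_range, pvRangeAll r1 r2 a b hl]

lemma pvFailBoth (r1 r2 : List Int) (a b : Int) (n : Nat) (hn2 : n < r2.length)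
    (hn1 : n < r1.length) (hf : 1 < r1.getD n 0 + r2.getD n 0) :
    valid_rows (r1 ++ [a]) (r2 ++ [b]) = false ∧ pvCompat r1 r2 = false := by
  constructor
  · rw [pvValidRows_range, List.all_eq_false]
    refine ⟨n, List.mem_range.mpr hn1, ?_⟩
    rw [List.getD_append _ _ _ _ hn1, List.getD_append _ _ _ _ hn2]
    simpa using hf
  · rw [pvCompat, List.all_eq_false]
    refine ⟨(r1.getD n 0, r2.getD n 0), ?_, by simpa using hf⟩
    have hlen : n < (r1.zip r2).length := by simp [List.length_zip]; omega
    have hmem := List.getElem_mem hlen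
    rwa [List.getElem_zip, ← List.getD_eq_getElem r1 0 hn1, ← List.getD_eq_getElem r2 0 hn2]
      at hmem

lemma pvFoldA (l : List (Int × List Int)) (S : PySem.Set Int) (rows : List (List Int)) :
    (l.foldl
      (fun (st : PySem.Set Int × List (List Int)) p =>
        let val := p.2.foldl (fun v num => v * 2 + num) 0
        if PySem.Set.contains st.1 val then st
        else (PySem.Set.add st.1 val, st.2 ++ [p.2 ++ [p.1]]))
      (S, rows)).2 = rows ++ (pvUniq l S).map (fun p => p.1 ++ [p.2]) := by
  induction l generalizing S rows with
  | nil => simp [pvUniq]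
  | cons p rest ih =>
    rw [List.foldl_cons]
    dsimp only
    simp only [pvUniq, pvKey]
    by_cases h : PySem.Set.contains S (List.foldl (fun v num => v * 2 + num) 0 p.2) = true
    · rw [if_pos h, if_pos h]
      exact ih S rows
    · rw [if_neg h, if_neg h]
      rw [ih (PySem.Set.add S (List.foldl (fun v num => v * 2 + num) 0 p.2)) (rows ++ [p.2 ++ [p.1]])]
      simp

/-- B's single fold factors through the dedup skeleton: the last three state
    components are a fold of the duplicate-free core step over pvUniq. -/
lemma pvFoldAlt : ∀ (l : List (Int × List Int)) (S : PySem.Set Int)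
    (t : List (List Int × Int) × Option Int × Option (Nat × Int × Int)),
    ((l.foldl
      (fun (st : PySem.Set Int × List (List Int × Int) × Option Int × Option (Nat × Int × Int)) p =>
        if PySem.Set.contains st.1 (p.2.foldl (fun v num => v * 2 + num) 0) then st
        else
          (PySem.Set.add st.1 (p.2.foldl (fun v num => v * 2 + num) 0),
           st.2.1 ++ [(p.2, p.1)],
           (if st.2.2.1 = none ∧ p.2.sum = (0 : Int) then some p.1 else st.2.2.1),
           (match pvScanB p.2 st.2.1 (match st.2.2.2 with | some b => b.1 | none => st.2.1.length) with
            | some x => some (x.1, x.2, p.1)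
            | none => st.2.2.2)))
      (S, t)).2
      = (pvUniq l S).foldl
          (fun (t : List (List Int × Int) × Option Int × Option (Nat × Int × Int)) p =>
            (t.1 ++ [p],
             (if t.2.1 = none ∧ p.1.sum = 0 then some p.2 else t.2.1),
             (match pvScanB p.1 t.1 (match t.2.2 with | some b => b.1 | none => t.1.length) with
              | some x => some (x.1, x.2, p.2)
              | none => t.2.2)))
          t)
  | [], _, _ => by simp [pvUniq]
  | p :: rest, S, t => by
    rw [List.foldl_cons]
    dsimp only
    simp only [pvUniq, pvKey]
    by_cases h : PySem.Set.contains S (List.foldl (fun v num => v * 2 + num) 0 p.2) = true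
    · rw [if_pos h, if_pos h]
      exact pvFoldAlt rest S t
    · rw [if_neg h, if_neg h, List.foldl_cons]
      exact pvFoldAlt rest (PySem.Set.add S (List.foldl (fun v num => v * 2 + num) 0 p.2)) _

lemma pvZero_append (L : List (List Int × Int)) (q : List Int × Int) :
    pvZero (L ++ [q])
      = if pvZero L = none ∧ q.1.sum = 0 then some q.2 else pvZero L := by
  simp only [pvZero, List.find?_append]
  cases hf : L.find? (fun p => decide (p.1.sum = 0)) with
  | some r => simp
  | none =>
    by_cases hq : q.1.sum = 0
    · simp [hq]
    · simp [hq]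

lemma pvScanB_zero (q : List Int) (L : List (List Int × Int)) :
    pvScanB q L 0 = none := by cases L <;> rfl

lemma pvScanB_cons (q : List Int) (p : List Int × Int) (rest : List (List Int × Int)) (l : Nat) :
    pvScanB q (p :: rest) (l + 1)
      = if pvCompat p.1 q then some (0, p.2)
        else (pvScanB q rest l).map (fun x => (x.1 + 1, x.2)) := rfl

lemma pvBest_append : ∀ (L : List (List Int × Int)) (q : List Int × Int),
    pvBest (L ++ [q])
      = match pvBest L with
        | none =>
          (pvScanB q.1 L L.length).map (fun x => (x.1, x.2, q.2))
        | some b =>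
          match pvScanB q.1 L b.1 with
          | some x => some (x.1, x.2, q.2)
          | none => some b
  | [], q => by simp [pvBest, pvScanB]
  | p :: L', q => by
    cases h1 : L'.find? (fun z => pvCompat p.1 z.1) with
    | some r =>
      simp only [List.cons_append, pvBest, List.find?_append, h1, Option.some_or, pvScanB_zero]
    | none =>
      by_cases hc : pvCompat p.1 q.1
      · simp only [List.cons_append, pvBest, List.find?_append, h1, Option.none_or,
          List.find?_cons, hc]
        cases h2 : pvBest L' with
        | some b' =>
          simp only [Option.map_some, pvScanB_cons, if_pos hc]
        | none =>
          simp only [Option.map_none, List.length_cons, pvScanB_cons, if_pos hc,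
            Option.map_some]
      · have hc' : pvCompat p.1 q.1 = false := by simpa using hc
        simp only [List.cons_append, pvBest, List.find?_append, h1, Option.none_or,
          List.find?_cons, List.find?_nil, hc']
        rw [pvBest_append L' q]
        cases h2 : pvBest L' with
        | some b' =>
          simp only [Option.map_some, pvScanB_cons]
          cases h3 : pvScanB q.1 L' b'.1 <;> simp [hc']
        | none =>
          simp only [Option.map_none, List.length_cons, pvScanB_cons]
          cases h3 : pvScanB q.1 L' L'.length <;> simp [hc']

/-- Folding the core step over V extends prev and keeps zero/best at their specs. -/
lemma pvCore : ∀ (V prev : List (List Int × Int)),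
    (V.foldl
      (fun (t : List (List Int × Int) × Option Int × Option (Nat × Int × Int)) p =>
        (t.1 ++ [p],
         (if t.2.1 = none ∧ p.1.sum = 0 then some p.2 else t.2.1),
         (match pvScanB p.1 t.1 (match t.2.2 with | some b => b.1 | none => t.1.length) with
          | some x => some (x.1, x.2, p.2)
          | none => t.2.2)))
      (prev, pvZero prev, pvBest prev))
    = (prev ++ V, pvZero (prev ++ V), pvBest (prev ++ V))
  | [], prev => by simp
  | v :: V', prev => by
    rw [List.foldl_cons]
    have hz : (if pvZero prev = none ∧ v.1.sum = 0 then some v.2 else pvZero prev)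
        = pvZero (prev ++ [v]) := (pvZero_append prev v).symm
    have hb : (match pvScanB v.1 prev (match pvBest prev with | some b => b.1 | none => prev.length) with
          | some x => some (x.1, x.2, v.2)
          | none => pvBest prev)
        = pvBest (prev ++ [v]) := by
      rw [pvBest_append prev v]
      cases h : pvBest prev with
      | none => cases hs : pvScanB v.1 prev prev.length <;> simp
      | some b => simp
    dsimp only
    rw [hz, hb, pvCore V' (prev ++ [v]), List.append_assoc]
    rfl

lemma pvBest_toPair : ∀ (L : List (List Int × Int)),
    (match pvBest L with
     | some b => [b.2.1, b.2.2]
     | none => ([] : List Int)) = pvPairLoopB L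
  | [] => rfl
  | (r1, i1) :: rest => by
    simp only [pvBest, pvPairLoopB]
    cases hf : rest.find? (fun q => pvCompat r1 q.1) with
    | some q => simp
    | none =>
      rw [← pvBest_toPair rest]
      cases h2 : pvBest rest with
      | some b => simp
      | none => simp

lemma pvPairEq : ∀ L : List (List Int × Int),
    L.Pairwise (fun p q => p.1.length ≤ q.1.length ∨
      ∃ n < q.1.length, n < p.1.length ∧ 1 < p.1.getD n 0 + q.1.getD n 0) →
    pvPairLoopA (L.map (fun p => p.1 ++ [p.2])) = pvPairLoopB L
  | [], _ => rfl
  | p :: rest, hL => by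
    obtain ⟨hhead, hrest⟩ := List.pairwise_cons.mp hL
    obtain ⟨r1, i1⟩ := p
    simp only [List.map_cons, pvPairLoopA, pvPairLoopB]
    rw [List.find?_map]
    have hpred : ∀ q ∈ rest,
        ((fun row_2 => valid_rows (r1 ++ [i1]) row_2) ∘ (fun q => q.1 ++ [q.2])) q
          = (fun (q : List Int × Int) => pvCompat r1 q.1) q := by
      intro q hq
      simp only [Function.comp_apply]
      rcases hhead q hq with hle | ⟨n, hn2, hn1, hf⟩
      · exact pvValidRows_eq r1 q.1 i1 q.2 hle
      · obtain ⟨hA, hB⟩ := pvFailBoth r1 q.1 i1 q.2 n hn2 hn1 hf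
        rw [hA, hB]
    rw [pvFind?_congr _ _ rest hpred]
    cases hf : rest.find? (fun (q : List Int × Int) => pvCompat r1 q.1) with
    | none => simpa using pvPairEq rest hrest
    | some q =>
      simp only [Option.map_some]
      rw [PySem.List.pyGetD_neg_one_append_singleton, PySem.List.pyGetD_neg_one_append_singleton]

-- ===== VERDICT (by name: the statement is the Claim_ definition above) =====
theorem goodSubsetofBinaryMatrix_spec : Claim_equal_goodSubsetofBinaryMatrix := by
  intro grid _ hsorted
  unfold Spec_goodSubsetofBinaryMatrix
  have hRgrid : grid.Pairwise (fun r s => r.length ≤ s.length ∨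
      ∃ n < s.length, n < r.length ∧ 1 < r.getD n 0 + s.getD n 0) := by
    refine hsorted.imp ?_
    intro r s h
    by_cases hle : r.length ≤ s.length
    · exact Or.inl hle
    · have hlt : s.length < r.length := by omega
      obtain ⟨n, hn, hf⟩ := h hlt
      exact Or.inr ⟨n, hn, by omega, hf⟩
  have hpwE : (PySem.List.enumerate grid 0).Pairwise (fun p q => p.2.length ≤ q.2.length ∨
      ∃ n < q.2.length, n < p.2.length ∧ 1 < p.2.getD n 0 + q.2.getD n 0) := by
    have h0 : ((PySem.List.enumerate grid 0).map (·.2)).Pairwise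
        (fun r s => r.length ≤ s.length ∨
          ∃ n < s.length, n < r.length ∧ 1 < r.getD n 0 + s.getD n 0) := by
      rw [PySem.List.map_snd_enumerate]; exact hRgrid
    exact (List.pairwise_map.mp h0).imp (fun h => h)
  have hpwL : (pvUniq (PySem.List.enumerate grid 0) PySem.Set.empty).Pairwise
      (fun p q => p.1.length ≤ q.1.length ∨
        ∃ n < q.1.length, n < p.1.length ∧ 1 < p.1.getD n 0 + q.1.getD n 0) := by
    have h2 := hpwE.sublist (pvUniq_sublist (PySem.List.enumerate grid 0) PySem.Set.empty)
    exact (List.pairwise_map.mp h2).imp (fun h => h)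
  have hA2 := pvFoldA (PySem.List.enumerate grid 0) PySem.Set.empty []
  rw [List.nil_append] at hA2
  simp only [goodSubsetofBinaryMatrix, goodSubsetofBinaryMatrix_alt]
  rw [hA2, pvFoldAlt (PySem.List.enumerate grid 0) PySem.Set.empty ([], none, none),
    show (([], none, none) : List (List Int × Int) × Option Int × Option (Nat × Int × Int))
        = (([] : List (List Int × Int)), pvZero [], pvBest []) from rfl,
    pvCore (pvUniq (PySem.List.enumerate grid 0) PySem.Set.empty) [],
    List.nil_append, List.find?_map]
  have hpredA : ∀ p ∈ pvUniq (PySem.List.enumerate grid 0) PySem.Set.empty,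
      ((fun row => decide ((PySem.List.slice row none (some (-1))).sum = 0))
          ∘ (fun (p : List Int × Int) => p.1 ++ [p.2])) p
        = (fun (p : List Int × Int) => decide (p.1.sum = 0)) p := by
    intro p _
    simp [Function.comp_apply, PySem.List.slice_to_neg_one]
  rw [pvFind?_congr _ _ _ hpredA]
  simp only [pvZero]
  cases hf : (pvUniq (PySem.List.enumerate grid 0) PySem.Set.empty).find?
      (fun p => decide (p.1.sum = 0)) with
  | some p =>
    simp only [Option.map_some]
    rw [PySem.List.pyGetD_neg_one_append_singleton]
  | none =>
    simp only [Option.map_none]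
    rw [pvBest_toPair (pvUniq (PySem.List.enumerate grid 0) PySem.Set.empty)]
    exact pvPairEq _ hpwL
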